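-- pv_equiv track=rewrite | github.com/miliar/Code_Jam_Webscraper | solutions_python/solutions_year16_round3_nr1/1169.py | solve
-- ===== SOURCE A (Python) =====
-- import string
--
-- def solve(lst):
--     alphabet = string.ascii_uppercase[:len(lst)]
--     maxelem, maxidx1, maxidx2 = 0, -1, -1
--     for idx, elem in enumerate(lst):
--         if elem >= maxelem:
--             maxelem = elem
--             maxidx2 = maxidx1
--             maxidx1 = int(idx)
--         elif maxidx2 == -1 or elem >= lst[maxidx2]:
--             maxidx2 = int(idx)
--
--
--     evacuate = []
--
--     diff = int(lst[maxidx1]) - int(lst[maxidx2])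
--     if diff > 0:
--         evacuate.append(' '.join(diff * alphabet[maxidx1]))
--     for idx, elem in enumerate(alphabet):
--         if elem != alphabet[maxidx1] and elem != alphabet[maxidx2]:
--             evacuate.append(' '.join(elem * int(lst[idx])))
--
--     evac = alphabet[maxidx1] + alphabet[maxidx2] + ' '
--     evacuate.append(''.join(evac * int(lst[maxidx2])))
--     return ' '.join(evacuate)
-- ===== SOURCE B (Python) =====
-- import string
--
-- def solve(lst):
--     n = len(lst)
--     alphabet = string.ascii_uppercase[:n]
--     order = sorted(range(n), key=lambda i: (lst[i], i))
--     maxidx1 = order[-1]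
--     maxidx2 = order[-2] if n > 1 else order[-1]
--     diff = lst[maxidx1] - lst[maxidx2]
--     parts = [' '.join(alphabet[maxidx1] * diff)] if diff > 0 else []
--     parts += [' '.join(alphabet[i] * lst[i])
--               for i in range(n) if i != maxidx1 and i != maxidx2]
--     parts.append((alphabet[maxidx1] + alphabet[maxidx2] + ' ') * lst[maxidx2])
--     return ' '.join(parts)
-- ===== Notes on version B (the rewrite author's own statement) =====
-- stated objective: simpler
-- what changed: A's single-pass running-two-maxima scan with its maxidx2==-1 sentinel is replaced by sorting the indices once by (value, index) and taking the last two, and the appending output loop is replaced by a comprehension over the non-selected indices.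
-- outside the precondition, e.g. on solve([-1, 0]): A returns ' ', B returns 'B '
import Mathlib
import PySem

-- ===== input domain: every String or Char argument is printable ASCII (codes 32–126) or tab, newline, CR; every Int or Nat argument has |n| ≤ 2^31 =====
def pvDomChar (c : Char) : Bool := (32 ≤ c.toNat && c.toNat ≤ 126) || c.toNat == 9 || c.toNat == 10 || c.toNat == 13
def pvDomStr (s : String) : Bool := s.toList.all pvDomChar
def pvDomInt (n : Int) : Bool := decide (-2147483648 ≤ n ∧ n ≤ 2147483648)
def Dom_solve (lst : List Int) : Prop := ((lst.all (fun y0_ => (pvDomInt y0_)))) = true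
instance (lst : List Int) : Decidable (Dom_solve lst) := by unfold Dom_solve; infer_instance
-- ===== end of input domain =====

-- B replaces A's hand-rolled running-two-maxima scan by selecting the top two indices
-- from a (value, index)-sorted ranking, and builds the output by filter/concat instead
-- of an appending loop (objective: simpler).

-- ===== PORT A =====
-- the loop body of A's scan over enumerate(lst) (state = (maxelem, maxidx1, maxidx2))
def stepA (lst : List Int) (s : Int × Int × Int) (p : Int × Int) : Int × Int × Int :=
  if p.2 ≥ s.1 then (p.2, p.1, s.2.1)
  else if s.2.2 = -1 ∨ p.2 ≥ PySem.List.pyGetD lst s.2.2 0 then (s.1, s.2.1, p.1)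
  else s

def solve (lst : List Int) : String :=
  let alphabet : List Char :=
    PySem.List.slice "ABCDEFGHIJKLMNOPQRSTUVWXYZ".toList none (some (lst.length : Int))
  let st := (PySem.List.enumerate lst).foldl (stepA lst) (0, -1, -1)
  let i1 := st.2.1
  let i2 := st.2.2
  let evacuate0 : List (List Char) := []
  let diff := PySem.List.pyGetD lst i1 0 - PySem.List.pyGetD lst i2 0
  let evacuate1 :=
    if diff > 0 then
      evacuate0 ++ [PySem.Chars.join [' ']
        ((PySem.List.pyRepeat [PySem.List.pyGetD alphabet i1 ' '] diff).map (fun c => [c]))]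
    else evacuate0
  let evacuate2 := (PySem.List.enumerate alphabet).foldl
    (fun acc p =>
      if p.2 ≠ PySem.List.pyGetD alphabet i1 ' ' ∧ p.2 ≠ PySem.List.pyGetD alphabet i2 ' ' then
        acc ++ [PySem.Chars.join [' ']
          ((PySem.List.pyRepeat [p.2] (PySem.List.pyGetD lst p.1 0)).map (fun c => [c]))]
      else acc)
    evacuate1
  let evac : List Char :=
    [PySem.List.pyGetD alphabet i1 ' ', PySem.List.pyGetD alphabet i2 ' ', ' ']
  let evacuate3 := evacuate2 ++
    [PySem.Chars.join [] ((PySem.List.pyRepeat evac (PySem.List.pyGetD lst i2 0)).map (fun c => [c]))]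
  String.ofList (PySem.Chars.join [' '] evacuate3)

-- ===== PORT B =====
def solve_alt (lst : List Int) : String :=
  let n : Int := lst.length
  let alphabet : List Char :=
    PySem.List.slice "ABCDEFGHIJKLMNOPQRSTUVWXYZ".toList none (some n)
  let order := PySem.List.sorted2 (PySem.List.pyRange 0 n 1)
    (fun i => PySem.List.pyGetD lst i 0) (fun i => i)
  let maxidx1 := PySem.List.pyGetD order (-1) 0
  let maxidx2 := if n > 1 then PySem.List.pyGetD order (-2) 0 else PySem.List.pyGetD order (-1) 0
  let diff := PySem.List.pyGetD lst maxidx1 0 - PySem.List.pyGetD lst maxidx2 0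
  let parts0 : List (List Char) :=
    if diff > 0 then
      [PySem.Chars.join [' ']
        ((PySem.List.pyRepeat [PySem.List.pyGetD alphabet maxidx1 ' '] diff).map (fun c => [c]))]
    else []
  let parts1 := parts0 ++
    ((PySem.List.pyRange 0 n 1).filter (fun i => decide (i ≠ maxidx1 ∧ i ≠ maxidx2))).map
      (fun i => PySem.Chars.join [' ']
        ((PySem.List.pyRepeat [PySem.List.pyGetD alphabet i ' '] (PySem.List.pyGetD lst i 0)).map (fun c => [c])))
  let parts2 := parts1 ++
    [PySem.List.pyRepeat
      [PySem.List.pyGetD alphabet maxidx1 ' ', PySem.List.pyGetD alphabet maxidx2 ' ', ' ']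
      (PySem.List.pyGetD lst maxidx2 0)]
  String.ofList (PySem.Chars.join [' '] parts2)

-- ===== PRECONDITION & SPEC =====
-- Pre_ restricts to the task's natural domain (elevator counts, one per letter): a nonempty list
-- of at most 26 counts whose first entry is nonnegative. Outside it A's value is an accident of
-- its code (with a negative first entry the scan's 0-initialised running maximum can leave an
-- index variable at its -1 sentinel, which then wraps around as a Python index; letters past 'Z'
-- do not exist) or A raises (empty list, IndexError past 'Z').
def Pre_solve (lst : List Int) : Prop :=
  lst ≠ [] ∧ lst.length ≤ 26 ∧ 0 ≤ lst.headD 0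
instance (lst : List Int) : Decidable (Pre_solve lst) := by unfold Pre_solve; infer_instance
def pvWitness_solve : List Int := [2, 0, 3, 3]

def Spec_solve (lst : List Int) (out : String) : Prop := out = solve_alt lst
instance (lst : List Int) (out : String) : Decidable (Spec_solve lst out) := by unfold Spec_solve; infer_instance

-- ===== CLAIM (what is proved, stated in full; the proofs are below) =====
def Claim_equal_solve : Prop := ∀ (lst : List Int), Dom_solve lst → Pre_solve lst → Spec_solve lst (solve lst)

-- ===== LEMMAS AND PROOFS =====

-- the lexicographic (value, index) key both selections maximise
def lexKey (lst : List Int) (i : Int) : Lex (Int × Int) := toLex (PySem.List.pyGetD lst i 0, i)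

theorem lexKey_le {lst : List Int} {i j : Int}
    (h : PySem.List.pyGetD lst i 0 < PySem.List.pyGetD lst j 0 ∨
      (PySem.List.pyGetD lst i 0 = PySem.List.pyGetD lst j 0 ∧ i ≤ j)) :
    lexKey lst i ≤ lexKey lst j := by
  simpa [lexKey, Prod.Lex.toLex_le_toLex] using h

theorem lexKey_le_elim {lst : List Int} {i j : Int} (h : lexKey lst i ≤ lexKey lst j) :
    PySem.List.pyGetD lst i 0 < PySem.List.pyGetD lst j 0 ∨
      (PySem.List.pyGetD lst i 0 = PySem.List.pyGetD lst j 0 ∧ i ≤ j) := by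
  simpa [lexKey, Prod.Lex.toLex_le_toLex] using h

theorem lexKey_eq_of_le_le {lst : List Int} {i j : Int}
    (h1 : lexKey lst i ≤ lexKey lst j) (h2 : lexKey lst j ≤ lexKey lst i) : i = j := by
  have e1 := lexKey_le_elim h1
  have e2 := lexKey_le_elim h2
  omega

-- B's sorted2 call is a plain sort by the lexicographic key
theorem sorted2_eq_sorted_lex (xs : List Int) (lst : List Int) :
    PySem.List.sorted2 xs (fun i => PySem.List.pyGetD lst i 0) (fun i => i) false
      = PySem.List.sorted xs (lexKey lst) false := by
  have hbf : (fun a b : Int =>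
      (decide (PySem.List.pyGetD lst a 0 < PySem.List.pyGetD lst b 0) ||
        (!decide (PySem.List.pyGetD lst b 0 < PySem.List.pyGetD lst a 0) && decide (a < b))))
      = fun a b : Int => decide (lexKey lst a < lexKey lst b) := by
    funext a b
    simp only [lexKey, Prod.Lex.toLex_lt_toLex]
    rcases lt_trichotomy (PySem.List.pyGetD lst a 0) (PySem.List.pyGetD lst b 0) with h|h|h
    · simp [h]
    · simp [h]
    · simp [h, asymm h, h.ne']
  simp only [PySem.List.sorted2, PySem.List.sorted, hbf, Bool.false_eq_true, if_false]

-- last element of a ≤-pairwise list bounds every element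
theorem le_getLast_of_pairwise {α κ : Type} [LinearOrder κ] (key : α → κ) (l : List α)
    (hp : l.Pairwise (fun a b => key a ≤ key b)) (h : l ≠ []) :
    ∀ x ∈ l, key x ≤ key (l.getLast h) := by
  induction l with
  | nil => simp at h
  | cons a t ih =>
    rcases List.pairwise_cons.mp hp with ⟨ha, ht⟩
    intro x hx
    rcases List.mem_cons.mp hx with rfl | hxt
    · cases t with
      | nil => simp
      | cons b t' =>
        rw [List.getLast_cons (by simp)]
        exact ha _ (List.getLast_mem _)
    · have htne : t ≠ [] := List.ne_nil_of_mem hxt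
      rw [List.getLast_cons htne]
      exact ih ht htne x hxt

-- A's scan invariant, proved over prefixes of enumerate(lst)
theorem scanA_inv (lst : List Int) (hpos : 0 ≤ lst.headD 0) (k : Nat)
    (hk1 : 1 ≤ k) (hkn : k ≤ lst.length) :
    (fun s : Int × Int × Int =>
    (0 ≤ s.2.1 ∧ s.2.1 < (k : Int)) ∧ s.1 = PySem.List.pyGetD lst s.2.1 0 ∧
    (∀ j : Int, 0 ≤ j → j < (k : Int) → lexKey lst j ≤ lexKey lst s.2.1) ∧
    (if k = 1 then s.2.2 = -1 else
      (0 ≤ s.2.2 ∧ s.2.2 < (k : Int)) ∧ s.2.2 ≠ s.2.1 ∧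
      (∀ j : Int, 0 ≤ j → j < (k : Int) → j ≠ s.2.1 → lexKey lst j ≤ lexKey lst s.2.2)))
    (((PySem.List.enumerate lst).take k).foldl (stepA lst) (0, -1, -1)) := by
  induction k with
  | zero => omega
  | succ k ih =>
    rcases Nat.eq_or_lt_of_le hk1 with h1 | h2
    · -- k + 1 = 1, i.e. k = 0 : base case
      have hk0 : k = 0 := by omega
      subst hk0
      have hlen : 0 < lst.length := by omega
      have htake : (PySem.List.enumerate lst).take 1 = [((0:Int), lst[0])] := by
        rw [List.take_add_one]
        simp [PySem.List.getElem?_enumerate, List.getElem?_eq_getElem hlen]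
      rw [htake]
      have h0 : (0:Int) ≤ lst[0] := by
        cases lst with
        | nil => simp at hlen
        | cons a t => simpa using hpos
      simp only [List.foldl_cons, List.foldl_nil, stepA, ge_iff_le]
      rw [if_pos h0]
      dsimp only
      refine ⟨by norm_num, ?_, ?_, by simp⟩
      · simp [PySem.List.pyGetD_zero, List.getD, List.getElem?_eq_getElem hlen]
      · intro j hj0 hj1
        have : j = 0 := by omega
        subst this
        exact le_refl _
    · -- inductive step, k ≥ 1
      have hk : 1 ≤ k := by omega
      have hkl : k < lst.length := by omega
      obtain ⟨⟨hb0, hb1⟩, hme, hmax, hrest⟩ := ih hk (by omega)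
      set s := ((PySem.List.enumerate lst).take k).foldl (stepA lst) (0, -1, -1) with hs
      have htake : (PySem.List.enumerate lst).take (k+1)
          = (PySem.List.enumerate lst).take k ++ [((k : Int), lst[k])] := by
        rw [List.take_add_one]
        simp [PySem.List.getElem?_enumerate, List.getElem?_eq_getElem hkl]
      rw [htake, List.foldl_append, ← hs]
      simp only [List.foldl_cons, List.foldl_nil]
      have hek : PySem.List.pyGetD lst (k : Int) 0 = lst[k] := by
        simp [PySem.List.pyGetD_natCast, List.getD, List.getElem?_eq_getElem hkl]
      by_cases hcase : lst[k] ≥ s.1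
      · -- record: new state (lst[k], k, old i1)
        simp only [stepA, ge_iff_le]
        rw [if_pos hcase]
        dsimp only
        refine ⟨⟨by positivity, by push_cast; omega⟩, hek.symm, ?_, ?_⟩
        · intro j hj0 hj1
          by_cases hjk : j = (k : Int)
          · subst hjk; exact le_refl _
          · have hjlt : j < (k : Int) := by omega
            refine le_trans (hmax j hj0 hjlt) (lexKey_le ?_)
            rw [hek, ← hme]
            rcases lt_or_eq_of_le hcase with h | h
            · exact Or.inl h
            · exact Or.inr ⟨h, by omega⟩
        · rw [if_neg (by omega)]
          refine ⟨⟨hb0, by omega⟩, by omega, ?_⟩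
          intro j hj0 hj1 hjne
          have hjlt : j < (k : Int) := by omega
          exact hmax j hj0 hjlt
      · by_cases hcase2 : s.2.2 = -1 ∨ lst[k] ≥ PySem.List.pyGetD lst s.2.2 0
        · -- new second index = k
          simp only [stepA, ge_iff_le]
          rw [if_neg hcase, if_pos hcase2]
          dsimp only
          have hi1 : ∀ j : Int, 0 ≤ j → j < ((k+1 : Nat) : Int) → lexKey lst j ≤ lexKey lst s.2.1 := by
            intro j hj0 hj1
            by_cases hjk : j = (k : Int)
            · subst hjk
              exact lexKey_le (Or.inl (by rw [hek] at *; omega))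
            · exact hmax j hj0 (by push_cast at hj1 ⊢; omega)
          refine ⟨⟨hb0, by push_cast; omega⟩, hme, hi1, ?_⟩
          rw [if_neg (by omega)]
          refine ⟨⟨by positivity, by push_cast; omega⟩, by omega, ?_⟩
          intro j hj0 hj1 hjne
          by_cases hjk : j = (k : Int)
          · subst hjk; exact le_refl _
          · have hjlt : j < (k : Int) := by omega
            rcases hcase2 with hm1 | hge
            · -- old i2 = -1 : only possible when k = 1, then j must equal i1
              by_cases hk1' : k = 1
              · subst hk1'
                omega
              · rw [if_neg hk1'] at hrest
                exact absurd hm1 (by omega)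
            · rw [if_neg (by omega)] at hrest
              obtain ⟨⟨hc0, hc1⟩, hcne, hsec⟩ := hrest
              refine le_trans (hsec j hj0 hjlt hjne) (lexKey_le ?_)
              rcases lt_or_eq_of_le hge with h | h
              · exact Or.inl (by rw [hek]; omega)
              · exact Or.inr ⟨by rw [hek]; omega, by omega⟩
        · -- unchanged
          simp only [stepA, ge_iff_le]
          rw [if_neg hcase, if_neg hcase2]
          rw [not_or] at hcase2
          obtain ⟨hne, hlt⟩ := hcase2
          have hk1' : k ≠ 1 := by
            intro h; subst h
            rw [if_pos rfl] at hrest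
            exact hne hrest
          rw [if_neg hk1'] at hrest
          obtain ⟨⟨hc0, hc1⟩, hcne, hsec⟩ := hrest
          refine ⟨⟨hb0, by push_cast; omega⟩, hme, ?_, ?_⟩
          · intro j hj0 hj1
            by_cases hjk : j = (k : Int)
            · subst hjk
              refine lexKey_le (Or.inl ?_)
              rw [hek, ← hme] at *
              omega
            · exact hmax j hj0 (by push_cast at hj1 ⊢; omega)
          · rw [if_neg (by omega)]
            refine ⟨⟨hc0, by push_cast; omega⟩, hcne, ?_⟩
            intro j hj0 hj1 hjne
            by_cases hjk : j = (k : Int)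
            · subst hjk
              exact lexKey_le (Or.inl (by rw [hek]; omega))
            · exact hsec j hj0 (by push_cast at hj1 ⊢; omega) hjne

-- characterisation of B's order: the last element is the lex argmax,
-- the second-to-last is the lex argmax among the remaining indices
theorem orderB_last (lst : List Int) (hne : lst ≠ []) :
    (fun o1 : Int =>
      (0 ≤ o1 ∧ o1 < (lst.length : Int)) ∧
      (∀ j : Int, 0 ≤ j → j < (lst.length : Int) → lexKey lst j ≤ lexKey lst o1))
    (PySem.List.pyGetD
      (PySem.List.sorted (PySem.List.pyRange 0 (lst.length : Int) 1) (lexKey lst) false) (-1) 0) := by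
  set n : Int := (lst.length : Int) with hn
  set order := PySem.List.sorted (PySem.List.pyRange 0 n 1) (lexKey lst) false with horder
  have hperm : order.Perm (PySem.List.pyRange 0 n 1) := PySem.List.sorted_perm _ _ _
  have hlen : order.length = lst.length := by
    rw [hperm.length_eq, PySem.List.length_pyRange_one]
    omega
  have hone : order ≠ [] := by
    intro h
    rw [h] at hlen
    simp at hlen
    exact hne (List.length_eq_zero_iff.mp hlen.symm)
  have hpair := PySem.List.sorted_pairwise (PySem.List.pyRange 0 n 1) (lexKey lst)
  rw [← horder] at hpair
  have hmemo : ∀ x ∈ order, 0 ≤ x ∧ x < n := by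
    intro x hx
    have := PySem.List.mem_pyRange_one.mp (hperm.mem_iff.mp hx)
    omega
  rw [PySem.List.pyGetD_neg_one order 0 hone]
  refine ⟨hmemo _ (List.getLast_mem hone), ?_⟩
  intro j hj0 hj1
  have hjmem : j ∈ order := hperm.mem_iff.mpr (PySem.List.mem_pyRange_one.mpr ⟨hj0, hj1⟩)
  exact le_getLast_of_pairwise (lexKey lst) order hpair hone j hjmem

theorem orderB_second (lst : List Int) (h2 : 2 ≤ lst.length) :
    (fun (o1 o2 : Int) =>
      o2 ≠ o1 ∧ (0 ≤ o2 ∧ o2 < (lst.length : Int)) ∧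
      (∀ j : Int, 0 ≤ j → j < (lst.length : Int) → j ≠ o1 → lexKey lst j ≤ lexKey lst o2))
    (PySem.List.pyGetD
      (PySem.List.sorted (PySem.List.pyRange 0 (lst.length : Int) 1) (lexKey lst) false) (-1) 0)
    (PySem.List.pyGetD
      (PySem.List.sorted (PySem.List.pyRange 0 (lst.length : Int) 1) (lexKey lst) false) (-2) 0) := by
  set n : Int := (lst.length : Int) with hn
  set order := PySem.List.sorted (PySem.List.pyRange 0 n 1) (lexKey lst) false with horder
  have hperm : order.Perm (PySem.List.pyRange 0 n 1) := PySem.List.sorted_perm _ _ _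
  have hlen : order.length = lst.length := by
    rw [hperm.length_eq, PySem.List.length_pyRange_one]
    omega
  have hone : order ≠ [] := by
    intro h
    rw [h] at hlen
    simp at hlen
    omega
  have hpair := PySem.List.sorted_pairwise (PySem.List.pyRange 0 n 1) (lexKey lst)
  rw [← horder] at hpair
  have hnd : order.Nodup := hperm.nodup_iff.mpr (PySem.List.nodup_pyRange_one 0 n)
  have hmemo : ∀ x ∈ order, 0 ≤ x ∧ x < n := by
    intro x hx
    have := PySem.List.mem_pyRange_one.mp (hperm.mem_iff.mp hx)
    omega
  have hdlne : order.dropLast ≠ [] := by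
    intro h
    have hld : (order.dropLast).length = order.length - 1 := List.length_dropLast
    rw [h] at hld
    simp at hld
    omega
  have hsplit : order.dropLast ++ [order.getLast hone] = order := List.dropLast_append_getLast hone
  rw [PySem.List.pyGetD_neg_one order 0 hone]
  have ho2 : PySem.List.pyGetD order (-2) 0 = order.dropLast.getLast hdlne := by
    rw [PySem.List.pyGetD_neg_ofNat order 2 0 (by omega) (by omega)]
    rw [List.getLast_eq_getElem]
    rw [List.getElem_dropLast]
    have hidx : order.dropLast.length - 1 = order.length - 2 := by
      simp only [List.length_dropLast]
      omega
    simp only [hidx]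
  have hdl_pair : order.dropLast.Pairwise (fun a b => lexKey lst a ≤ lexKey lst b) :=
    hpair.sublist (List.dropLast_sublist order)
  have ho1notin : order.getLast hone ∉ order.dropLast := by
    intro hmem
    have hnd2 := hnd
    rw [← hsplit] at hnd2
    rcases List.nodup_append.mp hnd2 with ⟨-, -, hdisj⟩
    exact hdisj _ hmem _ (List.mem_singleton_self _) rfl
  have ho2mem : order.dropLast.getLast hdlne ∈ order.dropLast := List.getLast_mem hdlne
  rw [ho2]
  refine ⟨?_, ?_, ?_⟩
  · intro h
    rw [h] at ho2mem
    exact ho1notin ho2mem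
  · exact hmemo _ (List.mem_of_mem_dropLast ho2mem)
  · intro j hj0 hj1 hjne
    have hjmem : j ∈ order := hperm.mem_iff.mpr (PySem.List.mem_pyRange_one.mpr ⟨hj0, hj1⟩)
    have hjdl : j ∈ order.dropLast := by
      rw [← hsplit] at hjmem
      rcases List.mem_append.mp hjmem with h | h
      · exact h
      · exact absurd (List.mem_singleton.mp h) hjne
    exact le_getLast_of_pairwise (lexKey lst) order.dropLast hdl_pair hdlne j hjdl

-- common rendering of the output, parametrised by the two chosen indices (proof-side helper;
-- its body is solve_alt's output-building code)
def renderP (lst : List Int) (maxidx1 maxidx2 : Int) : String :=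
  let n : Int := lst.length
  let alphabet : List Char :=
    PySem.List.slice "ABCDEFGHIJKLMNOPQRSTUVWXYZ".toList none (some n)
  let diff := PySem.List.pyGetD lst maxidx1 0 - PySem.List.pyGetD lst maxidx2 0
  let parts0 : List (List Char) :=
    if diff > 0 then
      [PySem.Chars.join [' ']
        ((PySem.List.pyRepeat [PySem.List.pyGetD alphabet maxidx1 ' '] diff).map (fun c => [c]))]
    else []
  let parts1 := parts0 ++
    ((PySem.List.pyRange 0 n 1).filter (fun i => decide (i ≠ maxidx1 ∧ i ≠ maxidx2))).map
      (fun i => PySem.Chars.join [' ']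
        ((PySem.List.pyRepeat [PySem.List.pyGetD alphabet i ' '] (PySem.List.pyGetD lst i 0)).map (fun c => [c])))
  let parts2 := parts1 ++
    [PySem.List.pyRepeat
      [PySem.List.pyGetD alphabet maxidx1 ' ', PySem.List.pyGetD alphabet maxidx2 ' ', ' ']
      (PySem.List.pyGetD lst maxidx2 0)]
  String.ofList (PySem.Chars.join [' '] parts2)

theorem alphabet_take (lst : List Int) :
    PySem.List.slice "ABCDEFGHIJKLMNOPQRSTUVWXYZ".toList none (some (lst.length : Int))
      = "ABCDEFGHIJKLMNOPQRSTUVWXYZ".toList.take lst.length :=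
  PySem.List.slice_to_natCast _ _

theorem alphabet_pyGetD_inj (lst : List Int) (h26 : lst.length ≤ 26) {i j : Int}
    (hi0 : 0 ≤ i) (hi1 : i < (lst.length : Int)) (hj0 : 0 ≤ j) (hj1 : j < (lst.length : Int)) :
    (PySem.List.pyGetD ("ABCDEFGHIJKLMNOPQRSTUVWXYZ".toList.take lst.length) i ' '
      = PySem.List.pyGetD ("ABCDEFGHIJKLMNOPQRSTUVWXYZ".toList.take lst.length) j ' ') ↔ i = j := by
  have hlen : ("ABCDEFGHIJKLMNOPQRSTUVWXYZ".toList.take lst.length).length = lst.length := by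
    simp
    omega
  have hnd : ("ABCDEFGHIJKLMNOPQRSTUVWXYZ".toList.take lst.length).Nodup :=
    (List.take_sublist _ _).nodup (by decide)
  rw [PySem.List.pyGetD_eq_getElem _ _ hi0 (by simp; omega),
    PySem.List.pyGetD_eq_getElem _ _ hj0 (by simp; omega)]
  rw [List.Nodup.getElem_inj_iff hnd]
  omega

theorem solveB_eq_renderP_big (lst : List Int) (h2 : 2 ≤ lst.length) :
    solve_alt lst = renderP lst
      (PySem.List.pyGetD
        (PySem.List.sorted (PySem.List.pyRange 0 (lst.length : Int) 1) (lexKey lst) false) (-1) 0)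
      (PySem.List.pyGetD
        (PySem.List.sorted (PySem.List.pyRange 0 (lst.length : Int) 1) (lexKey lst) false) (-2) 0) := by
  have hgt : (1:Int) < (lst.length : Int) := by exact_mod_cast h2
  simp only [solve_alt, renderP, sorted2_eq_sorted_lex, gt_iff_lt, if_pos hgt]

theorem solveB_eq_renderP_one (lst : List Int) (h1 : lst.length = 1) :
    solve_alt lst = renderP lst
      (PySem.List.pyGetD
        (PySem.List.sorted (PySem.List.pyRange 0 (lst.length : Int) 1) (lexKey lst) false) (-1) 0)
      (PySem.List.pyGetD
        (PySem.List.sorted (PySem.List.pyRange 0 (lst.length : Int) 1) (lexKey lst) false) (-1) 0) := by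
  have hngt : ¬((1:Int) < (lst.length : Int)) := by simp [h1]
  simp only [solve_alt, renderP, sorted2_eq_sorted_lex, gt_iff_lt, if_neg hngt]

-- A's output, rewritten as renderP of the scan's two indices
theorem solveA_eq_renderP (lst : List Int) (h26 : lst.length ≤ 26)
    (hi1a : 0 ≤ ((PySem.List.enumerate lst).foldl (stepA lst) (0, -1, -1)).2.1)
    (hi1b : ((PySem.List.enumerate lst).foldl (stepA lst) (0, -1, -1)).2.1 < (lst.length : Int))
    (hi2a : 0 ≤ ((PySem.List.enumerate lst).foldl (stepA lst) (0, -1, -1)).2.2)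
    (hi2b : ((PySem.List.enumerate lst).foldl (stepA lst) (0, -1, -1)).2.2 < (lst.length : Int)) :
    solve lst = renderP lst ((PySem.List.enumerate lst).foldl (stepA lst) (0, -1, -1)).2.1
      ((PySem.List.enumerate lst).foldl (stepA lst) (0, -1, -1)).2.2 := by
  set s := (PySem.List.enumerate lst).foldl (stepA lst) (0, -1, -1) with hs
  simp only [solve, renderP, ← hs, alphabet_take]
  set AB := "ABCDEFGHIJKLMNOPQRSTUVWXYZ".toList.take lst.length with hAB
  have hlenAB : (AB.length : Int) = (lst.length : Int) := by
    simp [hAB]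
    omega
  rw [PySem.List.enumerate_eq_map_pyRange AB ' ', List.foldl_map]
  rw [PySem.List.foldl_append_ite
    (fun j : Int => (PySem.List.pyGetD AB j ' ' ≠ PySem.List.pyGetD AB s.2.1 ' '
      ∧ PySem.List.pyGetD AB j ' ' ≠ PySem.List.pyGetD AB s.2.2 ' '))]
  simp only [List.nil_append, PySem.List.len_eq, hlenAB]
  have hfil : List.filter
      (fun x => decide (PySem.List.pyGetD AB x ' ' ≠ PySem.List.pyGetD AB s.2.1 ' '
        ∧ PySem.List.pyGetD AB x ' ' ≠ PySem.List.pyGetD AB s.2.2 ' '))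
      (PySem.List.pyRange 0 (lst.length : Int) 1)
      = List.filter (fun i => decide (i ≠ s.2.1 ∧ i ≠ s.2.2))
        (PySem.List.pyRange 0 (lst.length : Int) 1) := by
    apply List.filter_congr
    intro j hj
    have hjb := PySem.List.mem_pyRange_one.mp hj
    simp only [decide_eq_decide, hAB, ne_eq]
    rw [not_iff_not.mpr (alphabet_pyGetD_inj lst h26 hjb.1 hjb.2 hi1a hi1b),
      not_iff_not.mpr (alphabet_pyGetD_inj lst h26 hjb.1 hjb.2 hi2a hi2b)]
  rw [hfil, PySem.Chars.join_nil_singletons]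

-- ===== VERDICT (by name: the statement is the Claim_ definition above) =====
theorem solve_spec : Claim_equal_solve := by
  unfold Claim_equal_solve
  intro lst _ hpre
  obtain ⟨hnil, h26, hpos⟩ := hpre
  unfold Spec_solve
  have hlen1 : 1 ≤ lst.length := List.length_pos_iff.mpr hnil
  have htakefull : (PySem.List.enumerate lst).take lst.length = PySem.List.enumerate lst :=
    List.take_of_length_le (by simp [PySem.List.length_enumerate])
  have hinv := scanA_inv lst hpos lst.length hlen1 (le_refl _)
  rw [htakefull] at hinv
  obtain ⟨⟨hb0, hb1⟩, hme, hmax, hrest⟩ := hinv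
  set s := (PySem.List.enumerate lst).foldl (stepA lst) (0, -1, -1) with hs
  obtain ⟨⟨ho10, ho11⟩, ho1max⟩ := orderB_last lst hnil
  by_cases h2 : 2 ≤ lst.length
  · -- general case
    rw [if_neg (by omega)] at hrest
    obtain ⟨⟨hc0, hc1⟩, hcne, hsec⟩ := hrest
    obtain ⟨ho2ne, ⟨ho20, ho21⟩, ho2max⟩ := orderB_second lst h2
    have he1 : s.2.1 = PySem.List.pyGetD
        (PySem.List.sorted (PySem.List.pyRange 0 (lst.length : Int) 1) (lexKey lst) false) (-1) 0 :=
      lexKey_eq_of_le_le (ho1max _ hb0 hb1) (hmax _ ho10 ho11)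
    have he2 : s.2.2 = PySem.List.pyGetD
        (PySem.List.sorted (PySem.List.pyRange 0 (lst.length : Int) 1) (lexKey lst) false) (-2) 0 :=
      lexKey_eq_of_le_le (ho2max _ hc0 hc1 (by rw [← he1]; exact hcne))
        (hsec _ ho20 ho21 (by rw [he1]; exact ho2ne))
    rw [solveB_eq_renderP_big lst h2, solveA_eq_renderP lst h26 hb0 hb1 hc0 hc1, he1, he2]
  · -- single-element case
    have h1 : lst.length = 1 := by omega
    obtain ⟨x, rfl⟩ := List.length_eq_one_iff.mp h1
    have hx : (0:Int) ≤ x := by simpa using hpos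
    rw [solveB_eq_renderP_one [x] rfl]
    have hr1 : PySem.List.pyRange 0 (([x] : List Int).length : Int) 1 = [0] := by
      rw [show (([x] : List Int).length : Int) = 0 + 1 by simp, PySem.List.pyRange_one_singleton]
    have ho1 : PySem.List.pyGetD
        (PySem.List.sorted (PySem.List.pyRange 0 (([x] : List Int).length : Int) 1) (lexKey [x]) false) (-1) 0 = 0 := by
      rw [hr1]
      rfl
    rw [ho1]
    have hscan : (PySem.List.enumerate [x]).foldl (stepA [x]) (0, -1, -1) = (x, 0, -1) := by
      show stepA [x] (0, -1, -1) ((0:Int), x) = (x, 0, -1)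
      simp only [stepA, ge_iff_le]
      rw [if_pos hx]
    -- both sides computed concretely for a one-element list
    simp only [solve, renderP, hscan]
    have hAB1 : PySem.List.slice "ABCDEFGHIJKLMNOPQRSTUVWXYZ".toList none (some (([x] : List Int).length : Int)) = ['A'] := by
      rw [alphabet_take]
      rfl
    rw [hAB1, hr1]
    simp [PySem.Chars.join_nil_singletons, PySem.Chars.join_singleton, sub_self,
      show PySem.List.pyGetD [x] (-1) 0 = x from rfl, show PySem.List.pyGetD [x] 0 0 = x from rfl,
      show PySem.List.pyGetD ['A'] (-1) ' ' = 'A' from rfl,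
      show PySem.List.pyGetD ['A'] 0 ' ' = 'A' from rfl,
      show PySem.List.enumerate ['A'] = [((0:Int),'A')] from rfl]
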